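-- pv_equiv track=rewrite | github.com/Dan-jpg2/CSIK_Prog | modul9/v5_7.py | daily_ohlc
-- ===== SOURCE A (Python) =====
-- def daily_ohlc(data):
--     if not data:
--         return []
--
--     result = []
--     current_date = data[0][0]
--     prices = []
--
--     for date, time, price in data:
--         if date != current_date:
--             # Når datoen skifter, gem resultatet for den forrige dag
--             result.append((
--                 current_date,
--                 prices[0],          # Open
--                 max(prices),        # High
--                 min(prices),        # Low
--                 prices[-1]          # Close
--             ))
--             # Start på ny dag
--             current_date = date
--             prices = []
--         prices.append(price)
--
--     # Tilføj sidste dags data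
--     result.append((
--         current_date,
--         prices[0],
--         max(prices),
--         min(prices),
--         prices[-1]
--     ))
--
--     return result
-- ===== SOURCE B (Python) =====
-- def daily_ohlc(data):
--     # Keep running (open, high, low, close) in the last result row; no price list.
--     result = []
--     for date, time, price in data:
--         if result and result[-1][0] == date:
--             d, o, h, l, c = result[-1]
--             result[-1] = (d, o, max(h, price), min(l, price), price)
--         else:
--             result.append((date, price, price, price, price))
--     return result
-- ===== Notes on version B (the rewrite author's own statement) =====
-- stated objective: alternative
-- what changed: Replaces A's collect-then-aggregate design (buffer the day's price list, flush with max/min/indexing at each date change and after the loop) with a bufferless incremental fold: B stores only the running (open, high, low, close) in the last result row and merges each price into it with max/min updates, appending a fresh row when the date differs from the last row's date; no price list, no boundary flush, no post-loop step.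
import Mathlib
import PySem

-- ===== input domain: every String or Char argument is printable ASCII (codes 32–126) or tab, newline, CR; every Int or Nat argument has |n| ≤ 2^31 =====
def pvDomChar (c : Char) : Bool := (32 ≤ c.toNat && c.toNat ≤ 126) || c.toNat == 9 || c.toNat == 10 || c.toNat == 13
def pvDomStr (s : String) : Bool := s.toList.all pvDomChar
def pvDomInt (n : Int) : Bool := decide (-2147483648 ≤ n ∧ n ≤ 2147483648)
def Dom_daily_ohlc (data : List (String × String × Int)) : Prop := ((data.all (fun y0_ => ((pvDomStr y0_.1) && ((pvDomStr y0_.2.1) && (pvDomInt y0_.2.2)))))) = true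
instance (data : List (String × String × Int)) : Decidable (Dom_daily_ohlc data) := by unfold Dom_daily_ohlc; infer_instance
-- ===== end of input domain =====

-- B replaces A's buffered day (price list flushed with max/min at date changes and
-- after the loop) by an incremental fold keeping only the running OHLC in the last row.

-- ===== PORT A =====
-- A's loop state: accumulated result, current_date, prices of the current day.
-- On a date change the finished day is flushed; after the loop the last day is flushed.
-- prices is nonempty at every flush (the first row's date equals current_date), so the
-- headD/getLastD defaults below are never the result: max(prices) = foldl max over the
-- nonempty list, prices[0] = headD, prices[-1] = getLastD — exact on every reached call.
def loopA (res : List (String × Int × Int × Int × Int)) (cd : String) (ps : List Int) :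
    List (String × String × Int) → List (String × Int × Int × Int × Int)
  | [] => res ++ [(cd, ps.headD 0, ps.foldl max (ps.headD 0), ps.foldl min (ps.headD 0), ps.getLastD 0)]
  | (d, _t, p) :: rest =>
    if d ≠ cd then
      loopA (res ++ [(cd, ps.headD 0, ps.foldl max (ps.headD 0), ps.foldl min (ps.headD 0), ps.getLastD 0)])
        d [p] rest
    else
      loopA res cd (ps ++ [p]) rest

def daily_ohlc (data : List (String × String × Int)) : List (String × Int × Int × Int × Int) :=
  match data with
  | [] => []
  | (d0, _, _) :: _ => loopA [] d0 [] data

-- ===== PORT B =====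
-- one iteration of B's for loop: 'result[-1]' is getLast?, mutation of result[-1] is
-- dropLast ++ [updated row]; the 'result and result[-1][0] == date' guard is the match
-- on getLast? plus the date test.
def stepB (acc : List (String × Int × Int × Int × Int)) (row : String × String × Int) :
    List (String × Int × Int × Int × Int) :=
  match acc.getLast? with
  | some (d, o, h, l, _c) =>
    if d = row.1 then acc.dropLast ++ [(d, o, max h row.2.2, min l row.2.2, row.2.2)]
    else acc ++ [(row.1, row.2.2, row.2.2, row.2.2, row.2.2)]
  | none => acc ++ [(row.1, row.2.2, row.2.2, row.2.2, row.2.2)]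

def daily_ohlc_alt (data : List (String × String × Int)) : List (String × Int × Int × Int × Int) :=
  data.foldl stepB []

-- ===== PRECONDITION & SPEC =====
def Spec_daily_ohlc (data : List (String × String × Int)) (out : List (String × Int × Int × Int × Int)) : Prop := out = daily_ohlc_alt data
instance (data : List (String × String × Int)) (out : List (String × Int × Int × Int × Int)) : Decidable (Spec_daily_ohlc data out) := by unfold Spec_daily_ohlc; infer_instance

-- ===== CLAIM =====
def Claim_equal_daily_ohlc : Prop := ∀ (data : List (String × String × Int)), Dom_daily_ohlc data → Spec_daily_ohlc data (daily_ohlc data)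

-- ===== LEMMAS AND PROOFS =====

-- summary of one finished day, as A computes it
def summL (r : String × List Int) : String × Int × Int × Int × Int :=
  (r.1, r.2.headD 0, r.2.foldl max (r.2.headD 0), r.2.foldl min (r.2.headD 0), r.2.getLastD 0)

-- A's remaining runs, starting from current state (cd, ps)
def runsFrom (cd : String) (ps : List Int) : List (String × String × Int) → List (String × List Int)
  | [] => [(cd, ps)]
  | (d, _t, p) :: rest =>
    if d ≠ cd then (cd, ps) :: runsFrom d [p] rest
    else runsFrom cd (ps ++ [p]) rest

theorem loopA_eq_runsFrom : ∀ (rows : List (String × String × Int)) res cd ps,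
    loopA res cd ps rows = res ++ (runsFrom cd ps rows).map summL := by
  intro rows
  induction rows with
  | nil => intro res cd ps; simp [loopA, runsFrom, summL]
  | cons r rest ih =>
    intro res cd ps
    obtain ⟨d, t, p⟩ := r
    simp only [loopA, runsFrom]
    split
    · rw [ih]; simp [summL]
    · rw [ih]

theorem stepB_ne_nil (acc : List (String × Int × Int × Int × Int)) (row : String × String × Int) :
    stepB acc row ≠ [] := by
  unfold stepB
  rcases h : acc.getLast? with _ | ⟨d, o, hi, l, c⟩ <;> simp
  split <;> simp

theorem stepB_append (res l : List (String × Int × Int × Int × Int)) (row : String × String × Int)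
    (h : l ≠ []) : stepB (res ++ l) row = res ++ stepB l row := by
  unfold stepB
  rw [List.getLast?_append_of_ne_nil _ h, List.dropLast_append_of_ne_nil h]
  cases l.getLast? with
  | none => simp
  | some x => obtain ⟨d, o, hi, lo, c⟩ := x; dsimp only; split <;> simp

theorem foldl_stepB_append : ∀ (rows : List (String × String × Int))
    (res l : List (String × Int × Int × Int × Int)), l ≠ [] →
    rows.foldl stepB (res ++ l) = res ++ rows.foldl stepB l := by
  intro rows
  induction rows with
  | nil => intro res l _; rfl
  | cons r rest ih =>
    intro res l h
    simp only [List.foldl_cons]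
    rw [stepB_append res l r h, ih res _ (stepB_ne_nil l r)]

theorem foldB_runs : ∀ (rows : List (String × String × Int)) (cd : String) (ps : List Int),
    ps ≠ [] → rows.foldl stepB [summL (cd, ps)] = (runsFrom cd ps rows).map summL := by
  intro rows
  induction rows with
  | nil => intro cd ps _; simp [runsFrom]
  | cons r rest ih =>
    intro cd ps hps
    obtain ⟨d, t, p⟩ := r
    rcases ps with _ | ⟨p0, tl⟩
    · exact absurd rfl hps
    simp only [List.foldl_cons, runsFrom]
    by_cases hd : cd = d
    · subst hd
      have hstep : stepB [summL (cd, p0 :: tl)] (cd, t, p) = [summL (cd, (p0 :: tl) ++ [p])] := by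
        simp [stepB, summL, List.foldl_append, List.getLastD]
      rw [hstep, ih cd _ (by simp)]
      simp
    · have hstep : stepB [summL (cd, p0 :: tl)] (d, t, p)
          = [summL (cd, p0 :: tl)] ++ [summL (d, [p])] := by
        simp [stepB, summL, hd]
      rw [hstep, foldl_stepB_append rest _ _ (by simp), ih d [p] (by simp)]
      have hdc : ¬ (d = cd) := fun h => hd h.symm
      simp [hdc]

-- ===== VERDICT =====
theorem daily_ohlc_spec : Claim_equal_daily_ohlc := by
  intro data _
  unfold Spec_daily_ohlc daily_ohlc_alt
  match data with
  | [] => simp [daily_ohlc]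
  | (d0, t0, p0) :: rest =>
    simp only [daily_ohlc, loopA, ne_eq, not_true_eq_false, if_false]
    rw [loopA_eq_runsFrom]
    simp only [List.nil_append, List.foldl_cons]
    have h0 : stepB [] (d0, t0, p0) = [summL (d0, [p0])] := by
      simp [stepB, summL, List.getLastD]
    rw [h0, foldB_runs rest d0 [p0] (by simp)]
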